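-- pv_equiv track=rewrite | github.com/minarady1/wifi_for_industrial_robotics | plots/plotter.py | consecutive_overdelay
-- ===== SOURCE A (Python) =====
-- def consecutive_overdelay (data_list, threshold):
--     i=0
--     count = 0
--     output = []
--     while i< len(data_list):
--         if  data_list [i] > threshold:
--             count = count+1
--         elif count >0:
--             output.append(count)
--             count = 0
--         i=i+1
--
--     if count >0:
--         output.append(count)
--     return  output
-- ===== SOURCE B (Python) =====
-- def consecutive_overdelay(data_list, threshold):
--     output = []
--     i = 0
--     n = len(data_list)
--     while i < n:
--         if data_list[i] > threshold:
--             j = i + 1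
--             while j < n and data_list[j] > threshold:
--                 j += 1
--             output.append(j - i)
--             i = j
--         else:
--             i += 1
--     return output
-- ===== Notes on version B (the rewrite author's own statement) =====
-- stated objective: alternative
-- what changed: Replaces the running counter with post-loop flush by a run-at-a-time scan: on meeting an over-threshold element it consumes the whole run with an inner scan and appends its length directly, so no counter state or trailing-flush branch exists.
import Mathlib
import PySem

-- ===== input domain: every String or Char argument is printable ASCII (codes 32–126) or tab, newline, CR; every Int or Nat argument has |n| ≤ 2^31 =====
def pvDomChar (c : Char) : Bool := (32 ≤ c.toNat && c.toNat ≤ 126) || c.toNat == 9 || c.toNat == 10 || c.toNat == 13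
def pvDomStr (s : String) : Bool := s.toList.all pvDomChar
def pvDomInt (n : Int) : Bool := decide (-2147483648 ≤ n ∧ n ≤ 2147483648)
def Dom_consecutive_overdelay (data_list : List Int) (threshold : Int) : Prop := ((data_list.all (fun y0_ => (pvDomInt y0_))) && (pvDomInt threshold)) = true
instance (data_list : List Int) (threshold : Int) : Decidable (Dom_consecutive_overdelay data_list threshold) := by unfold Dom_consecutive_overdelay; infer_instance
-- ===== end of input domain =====

-- B replaces A's running counter + trailing flush by a run-at-a-time scan (consume each
-- over-threshold run with an inner scan and append its length); return values proved equal.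


-- ===== PORT A =====
-- A's while loop over (i, count, output); the list recursion stands for 'i = i+1'.
def pvLoopA (threshold : Int) : List Int → Int → List Int → List Int
  | [], count, output => if count > 0 then output ++ [count] else output
  | x :: xs, count, output =>
    if x > threshold then pvLoopA threshold xs (count + 1) output
    else if count > 0 then pvLoopA threshold xs 0 (output ++ [count])
    else pvLoopA threshold xs count output

def consecutive_overdelay (data_list : List Int) (threshold : Int) : List Int :=
  pvLoopA threshold data_list 0 []

-- ===== PORT B =====
-- B's outer while over i: skip a non-over element, or consume the whole over-run
-- (inner while = takeWhile/dropWhile) and append its length (j - i).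
-- The Nat fuel (initially the list length, enough for the whole scan) only makes the
-- recursion structural so the kernel can reduce it; it never changes the computation.
def pvGoB (threshold : Int) : Nat → List Int → List Int
  | _, [] => []
  | 0, _ :: _ => []
  | fuel + 1, x :: xs =>
    if x > threshold then
      (((xs.takeWhile (fun y => y > threshold)).length : Int) + 1)
        :: pvGoB threshold fuel (xs.dropWhile (fun y => y > threshold))
    else pvGoB threshold fuel xs

def consecutive_overdelay_alt (data_list : List Int) (threshold : Int) : List Int :=
  pvGoB threshold data_list.length data_list

-- ===== PRECONDITION & SPEC =====
def Spec_consecutive_overdelay (data_list : List Int) (threshold : Int) (out : List Int) : Prop := out = consecutive_overdelay_alt data_list threshold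
instance (data_list : List Int) (threshold : Int) (out : List Int) : Decidable (Spec_consecutive_overdelay data_list threshold out) := by unfold Spec_consecutive_overdelay; infer_instance

-- ===== CLAIM (what is proved, stated in full; the proofs are below) =====
def Claim_equal_consecutive_overdelay : Prop := ∀ (data_list : List Int) (threshold : Int), Dom_consecutive_overdelay data_list threshold → Spec_consecutive_overdelay data_list threshold (consecutive_overdelay data_list threshold)

-- ===== LEMMAS AND PROOFS =====

-- A's loop without the output accumulator.
def pvRuns (threshold : Int) : List Int → Int → List Int
  | [], count => if count > 0 then [count] else []
  | x :: xs, count =>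
    if x > threshold then pvRuns threshold xs (count + 1)
    else if count > 0 then count :: pvRuns threshold xs 0
    else pvRuns threshold xs count

theorem pvLoopA_eq_runs (t : Int) (xs : List Int) :
    ∀ c out, pvLoopA t xs c out = out ++ pvRuns t xs c := by
  induction xs with
  | nil => intro c out; simp only [pvLoopA, pvRuns]; split_ifs <;> simp
  | cons x xs ih =>
    intro c out
    simp only [pvLoopA, pvRuns]
    split_ifs with h1 h2
    · exact ih _ _
    · rw [ih]; simp
    · exact ih _ _

theorem pvGoB_fuel (t : Int) : ∀ (f1 f2 : Nat) (xs : List Int),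
    xs.length ≤ f1 → xs.length ≤ f2 → pvGoB t f1 xs = pvGoB t f2 xs := by
  intro f1
  induction f1 with
  | zero =>
    intro f2 xs h1 h2
    cases xs with
    | nil => cases f2 <;> simp [pvGoB]
    | cons x xs => simp at h1
  | succ f ih =>
    intro f2 xs h1 h2
    cases xs with
    | nil => cases f2 <;> simp [pvGoB]
    | cons x xs =>
      cases f2 with
      | zero => simp at h2
      | succ f2' =>
        simp only [List.length_cons] at h1 h2
        have h1' : xs.length ≤ f := by omega
        have h2' : xs.length ≤ f2' := by omega
        simp only [pvGoB]
        by_cases hx : x > t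
        · rw [if_pos hx, if_pos hx,
            ih f2' _ (le_trans (xs.length_dropWhile_le _) h1')
              (le_trans (xs.length_dropWhile_le _) h2')]
        · rw [if_neg hx, if_neg hx, ih f2' _ h1' h2']

theorem pvRuns_eq_goB (t : Int) (xs : List Int) :
    ∀ c : Int, 0 ≤ c →
      pvRuns t xs c =
        if 0 < c then
          (c + ((xs.takeWhile (fun y => y > t)).length : Int))
            :: pvGoB t (xs.dropWhile (fun y => y > t)).length (xs.dropWhile (fun y => y > t))
        else pvGoB t xs.length xs := by
  induction xs with
  | nil =>
    intro c hc
    simp only [pvRuns, pvGoB, List.takeWhile_nil, List.dropWhile_nil, List.length_nil]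
    split_ifs with h <;> simp
  | cons x xs ih =>
    intro c hc
    by_cases hx : x > t
    · have e1 : pvRuns t (x :: xs) c = pvRuns t xs (c + 1) := by simp [pvRuns, hx]
      have e2 : (x :: xs).takeWhile (fun y => y > t) = x :: xs.takeWhile (fun y => y > t) := by
        simp [hx]
      have e3 : (x :: xs).dropWhile (fun y => y > t) = xs.dropWhile (fun y => y > t) := by
        simp [hx]
      rw [e1, ih (c + 1) (by omega), if_pos (by omega : (0:Int) < c + 1), e2, e3]
      by_cases hc0 : 0 < c
      · rw [if_pos hc0, List.length_cons]
        congr 1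
        push_cast
        ring
      · have hc1 : c = 0 := by omega
        subst hc1
        rw [if_neg (by omega)]
        have e4 : pvGoB t (x :: xs).length (x :: xs) =
            (((xs.takeWhile (fun y => y > t)).length : Int) + 1)
              :: pvGoB t xs.length (xs.dropWhile (fun y => y > t)) := by
          simp [pvGoB, hx]
        rw [e4, pvGoB_fuel t xs.length (xs.dropWhile (fun y => y > t)).length _
          (xs.length_dropWhile_le _) le_rfl]
        congr 1
        push_cast
        ring
    · have e1 : pvRuns t (x :: xs) c =
          if 0 < c then c :: pvRuns t xs 0 else pvRuns t xs c := by
        simp [pvRuns, hx]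
      have e2 : (x :: xs).takeWhile (fun y => y > t) = [] := by
        simp [hx]
      have e3 : (x :: xs).dropWhile (fun y => y > t) = x :: xs := by
        simp [hx]
      have e5 : pvGoB t (x :: xs).length (x :: xs) = pvGoB t xs.length xs := by
        simp [pvGoB, hx]
      rw [e1, e2, e3]
      by_cases hc0 : 0 < c
      · rw [if_pos hc0, if_pos hc0, ih 0 le_rfl, if_neg (by omega), e5]
        simp
      · rw [if_neg hc0, if_neg hc0, ih c hc, if_neg hc0, e5]

-- ===== VERDICT (by name: the statement is the Claim_ definition above) =====
theorem consecutive_overdelay_spec : Claim_equal_consecutive_overdelay := by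
  intro data_list threshold _
  show _ = _
  unfold consecutive_overdelay consecutive_overdelay_alt
  rw [pvLoopA_eq_runs, pvRuns_eq_goB _ _ 0 le_rfl, if_neg (by omega)]
  simp
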